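-- pv_equiv track=rewrite | github.com/Singularity0104/equilibrium-planner | equilibrium_model/generate_equilibrium.py | split_action
-- ===== SOURCE A (Python) =====
-- def split_action(generate):
--     generate = generate.split('\n')
--     action_list = []
--     is_begin = False
--     for action in generate:
--         if action.startswith('['):
--             if not is_begin:
--                 is_begin = True
--             if 'SEP' in action:
--                 break
--             action_list.append(action)
--         else:
--             if is_begin:
--                 break
--     return action_list
-- ===== SOURCE B (Python) =====
-- def split_action(generate):
--     # Stage 1: partition the lines into maximal runs of equal bracket-ness.
--     runs = []
--     cur_key = None
--     cur = []
--     for line in generate.split('\n'):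
--         key = line.startswith('[')
--         if key == cur_key:
--             cur.append(line)
--         else:
--             if cur:
--                 runs.append((cur_key, cur))
--             cur_key, cur = key, [line]
--     if cur:
--         runs.append((cur_key, cur))
--     # Stage 2: the answer is the first bracket run, truncated before its first 'SEP' line.
--     for key, block in runs:
--         if key:
--             out = []
--             for line in block:
--                 if 'SEP' in line:
--                     break
--                 out.append(line)
--             return out
--     return []
-- ===== Notes on version B (the rewrite author's own statement) =====
-- stated objective: alternative
-- what changed: Replaced the flag-based accumulate-and-break state machine with a two-stage grouping pipeline: first partition all lines into maximal runs of equal bracket-ness (a list of (key, block) groups), then select the first bracket run and truncate it before its first 'SEP' line; there is no is_begin flag and no mid-scan break of the line loop.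
import Mathlib
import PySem

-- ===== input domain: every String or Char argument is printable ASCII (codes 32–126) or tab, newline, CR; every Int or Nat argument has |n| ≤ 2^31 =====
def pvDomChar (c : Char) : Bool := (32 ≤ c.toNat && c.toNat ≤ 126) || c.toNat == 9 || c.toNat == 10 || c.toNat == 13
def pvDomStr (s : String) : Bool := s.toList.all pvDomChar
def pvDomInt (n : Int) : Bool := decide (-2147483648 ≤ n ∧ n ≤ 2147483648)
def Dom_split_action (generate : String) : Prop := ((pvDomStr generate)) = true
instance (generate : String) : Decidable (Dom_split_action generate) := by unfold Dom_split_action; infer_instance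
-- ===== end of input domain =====

-- B replaces A's flag-based accumulate-and-break loop by a two-stage grouping pipeline
-- (partition the lines into maximal runs of equal bracket-ness, pick the first bracket run,
-- truncate it before its first 'SEP' line); objective: alternative decomposition, same cost.


-- ===== PORT A =====
-- the for-loop with its is_begin flag and break statements, as structural recursion
def splitA_loop : List String → List String → Bool → List String
  | [], acc, _ => acc
  | action :: rest, acc, is_begin =>
    if PySem.Str.startswith action "[" then
      -- `if not is_begin: is_begin = True` : the state is true in the recursive call
      if PySem.Str.isIn "SEP" action then acc            -- break
      else splitA_loop rest (acc ++ [action]) true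
    else
      if is_begin then acc                               -- break
      else splitA_loop rest acc is_begin

def split_action (generate : String) : List String :=
  -- generate.split('\n'); split? is none only for sep = "", so getD [] is exact here
  let lines := (PySem.Str.split? generate "\n").getD []
  splitA_loop lines [] false

-- ===== PORT B =====
def sb_key (l : String) : Bool := PySem.Str.startswith l "["

-- Stage-1 loop: state (runs, cur_key, cur); cur_key is None only while cur is empty,
-- and a group is only appended when cur is nonempty, so `.getD false` is never the default.
def sb_runs_loop : List String → List (Bool × List String) → Option Bool → List String →
    List (Bool × List String)
  | [], runs, curKey, cur =>
      if cur = [] then runs else runs ++ [(curKey.getD false, cur)]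
  | line :: rest, runs, curKey, cur =>
      let key := sb_key line
      if curKey == some key then
        sb_runs_loop rest runs curKey (cur ++ [line])
      else
        if cur = [] then sb_runs_loop rest runs (some key) [line]
        else sb_runs_loop rest (runs ++ [(curKey.getD false, cur)]) (some key) [line]

-- the inner `for line in block: if 'SEP' in line: break; out.append(line)`
def sb_cut : List String → List String → List String
  | [], out => out
  | line :: rest, out =>
      if PySem.Str.isIn "SEP" line then out else sb_cut rest (out ++ [line])

-- Stage 2: first bracket run, truncated
def sb_select : List (Bool × List String) → List String
  | [] => []
  | (key, block) :: rest => if key then sb_cut block [] else sb_select rest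

def split_action_alt (generate : String) : List String :=
  let lines := (PySem.Str.split? generate "\n").getD []
  sb_select (sb_runs_loop lines [] none [])

-- ===== PRECONDITION & SPEC =====
def Spec_split_action (generate : String) (out : List String) : Prop := out = split_action_alt generate
instance (generate : String) (out : List String) : Decidable (Spec_split_action generate out) := by unfold Spec_split_action; infer_instance

-- ===== CLAIM (what is proved, stated in full; the proofs are below) =====
def Claim_equal_split_action : Prop := ∀ (generate : String), Dom_split_action generate → Spec_split_action generate (split_action generate)

-- ===== LEMMAS AND PROOFS =====
def sa_p (l : String) : Bool := PySem.Str.startswith l "[" && !(PySem.Str.isIn "SEP" l)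
def sa_q (l : String) : Bool := !(PySem.Str.startswith l "[")
def sa_noSep (l : String) : Bool := !(PySem.Str.isIn "SEP" l)

-- ---- A side: the flag loop is takeWhile sa_p after dropWhile sa_q ----
theorem splitA_loop_true (xs : List String) : ∀ acc,
    splitA_loop xs acc true = acc ++ xs.takeWhile sa_p := by
  induction xs with
  | nil => intro acc; simp [splitA_loop]
  | cons a rest ih =>
    intro acc
    by_cases hs : PySem.Chars.startswith a.toList ['['] = true
    · by_cases hi : PySem.Chars.isIn ['S', 'E', 'P'] a.toList = true
      · simp [splitA_loop, List.takeWhile, sa_p, hs, hi]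
      · simp [splitA_loop, List.takeWhile, sa_p, hs, hi, ih]
    · simp [splitA_loop, List.takeWhile, sa_p, hs]

theorem splitA_loop_false (xs : List String) : ∀ acc,
    splitA_loop xs acc false = acc ++ (xs.dropWhile sa_q).takeWhile sa_p := by
  induction xs with
  | nil => intro acc; simp [splitA_loop]
  | cons a rest ih =>
    intro acc
    by_cases hs : PySem.Chars.startswith a.toList ['['] = true
    · by_cases hi : PySem.Chars.isIn ['S', 'E', 'P'] a.toList = true
      · simp [splitA_loop, List.dropWhile, sa_p, sa_q, hs, hi]
      · simp [splitA_loop, List.dropWhile, sa_p, sa_q, hs, hi, splitA_loop_true]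
    · simp [splitA_loop, List.dropWhile, sa_q, hs, ih]

-- ---- B side ----
theorem sb_cut_eq (xs : List String) : ∀ out,
    sb_cut xs out = out ++ xs.takeWhile sa_noSep := by
  induction xs with
  | nil => intro out; simp [sb_cut]
  | cons a rest ih =>
    intro out
    by_cases hi : PySem.Chars.isIn ['S', 'E', 'P'] a.toList = true
    · simp [sb_cut, List.takeWhile, sa_noSep, hi]
    · simp [sb_cut, List.takeWhile, sa_noSep, hi, ih]

-- output of the grouping loop always extends the runs accumulator
theorem sb_runs_loop_append (xs : List String) : ∀ runs curKey cur,
    sb_runs_loop xs runs curKey cur = runs ++ sb_runs_loop xs [] curKey cur := by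
  induction xs with
  | nil =>
    intro runs curKey cur
    by_cases h : cur = [] <;> simp [sb_runs_loop, h]
  | cons a rest ih =>
    intro runs curKey cur
    simp only [sb_runs_loop]
    by_cases hk : (curKey == some (sb_key a)) = true
    · rw [if_pos hk, if_pos hk]; exact ih runs curKey (cur ++ [a])
    · rw [if_neg hk, if_neg hk]
      by_cases h : cur = []
      · rw [if_pos h, if_pos h]; exact ih runs (some (sb_key a)) [a]
      · rw [if_neg h, if_neg h]
        rw [ih (runs ++ [(curKey.getD false, cur)]) (some (sb_key a)) [a],
            ih ([] ++ [(curKey.getD false, cur)]) (some (sb_key a)) [a]]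
        simp

-- selection skips an all-false prefix of the run list
theorem sb_select_skip (rs : List (Bool × List String)) (h : ∀ g ∈ rs, g.1 = false) :
    ∀ ts, sb_select (rs ++ ts) = sb_select ts := by
  induction rs with
  | nil => intro ts; simp
  | cons g rs ih =>
    intro ts
    have hg : g.1 = false := h g (by simp)
    have : sb_select ((g.1, g.2) :: (rs ++ ts)) = sb_select (rs ++ ts) := by
      simp [sb_select, hg]
    simpa using this.trans (ih (fun x hx => h x (by simp [hx])) ts)

theorem sb_select_all_false (rs : List (Bool × List String)) (h : ∀ g ∈ rs, g.1 = false) :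
    sb_select rs = [] := by
  simpa using sb_select_skip rs h []

theorem sb_select_hit (rs : List (Bool × List String)) (h : ∀ g ∈ rs, g.1 = false)
    (cur : List String) (ts : List (Bool × List String)) :
    sb_select (rs ++ (true, cur) :: ts) = sb_cut cur [] := by
  rw [sb_select_skip rs h]; simp [sb_select]

-- phase 2: the current run is a bracket run; no earlier run is a bracket run
theorem sbP2 (xs : List String) : ∀ runs cur, (∀ g ∈ runs, g.1 = false) → cur ≠ [] →
    sb_select (sb_runs_loop xs runs (some true) cur) =
      (cur ++ xs.takeWhile sb_key).takeWhile sa_noSep := by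
  induction xs with
  | nil =>
    intro runs cur hr hc
    simp only [sb_runs_loop]
    rw [if_neg hc]
    have := sb_select_hit runs hr cur []
    simpa [sb_cut_eq] using this
  | cons a rest ih =>
    intro runs cur hr hc
    simp only [sb_runs_loop]
    by_cases hs : sb_key a = true
    · rw [if_pos (by simp [hs])]
      rw [ih runs (cur ++ [a]) hr (by simp)]
      rw [List.takeWhile_cons_of_pos hs]
      simp
    · have hs' : sb_key a = false := by simpa using hs
      rw [if_neg (by simp [hs']), if_neg hc]
      rw [sb_runs_loop_append]
      rw [show runs ++ [((some true).getD false, cur)] ++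
            sb_runs_loop rest [] (some (sb_key a)) [a] =
          runs ++ (true, cur) :: sb_runs_loop rest [] (some (sb_key a)) [a] from by simp]
      rw [sb_select_hit runs hr]
      rw [List.takeWhile_cons_of_neg (by simp [hs'])]
      simp [sb_cut_eq]

theorem takeWhile_p_split (xs : List String) :
    xs.takeWhile sa_p = (xs.takeWhile sb_key).takeWhile sa_noSep := by
  induction xs with
  | nil => simp
  | cons a rest ih =>
    by_cases hs : PySem.Chars.startswith a.toList ['['] = true
    · by_cases hi : PySem.Chars.isIn ['S', 'E', 'P'] a.toList = true
      · simp [List.takeWhile, sa_p, sb_key, sa_noSep, PySem.Str.startswith, hs, hi]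
      · simp [List.takeWhile, sa_p, sb_key, sa_noSep, PySem.Str.startswith, hs, hi, ih]
    · simp [List.takeWhile, sa_p, sb_key, PySem.Str.startswith, hs]

-- phase 1: no bracket line seen yet
theorem sbP1 (xs : List String) : ∀ runs curKey cur, (∀ g ∈ runs, g.1 = false) →
    ((curKey = none ∧ cur = []) ∨ (curKey = some false ∧ cur ≠ [])) →
    sb_select (sb_runs_loop xs runs curKey cur) = (xs.dropWhile sa_q).takeWhile sa_p := by
  induction xs with
  | nil =>
    intro runs curKey cur hr hst
    rcases hst with ⟨hk, hc⟩ | ⟨hk, hc⟩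
    · subst hk; subst hc
      simp only [sb_runs_loop]
      simp [sb_select_all_false runs hr]
    · subst hk
      simp only [sb_runs_loop]
      rw [if_neg hc]
      have h2 : ∀ g ∈ runs ++ [((some false : Option Bool).getD false, cur)], g.1 = false := by
        intro g hg
        rcases List.mem_append.mp hg with h1 | h1
        · exact hr g h1
        · simp at h1; simp [h1]
      simp only [Option.getD_some] at h2
      simp [sb_select_all_false _ h2]
  | cons a rest ih =>
    intro runs curKey cur hr hst
    by_cases hs : sb_key a = true
    · -- enter phase 2
      have hq : sa_q a = false := by
        simp [sa_q, sb_key] at hs ⊢; simp [hs]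
      have rhs_eq : (List.dropWhile sa_q (a :: rest)).takeWhile sa_p =
          ([a] ++ rest.takeWhile sb_key).takeWhile sa_noSep := by
        rw [List.dropWhile_cons_of_neg (by simp [hq]), takeWhile_p_split,
          List.takeWhile_cons_of_pos hs]
        simp
      rcases hst with ⟨hk, hc⟩ | ⟨hk, hc⟩
      · subst hk; subst hc
        simp only [sb_runs_loop]
        rw [if_pos trivial, hs]
        rw [if_neg (by decide)]
        rw [sbP2 rest runs [a] hr (by simp)]
        exact rhs_eq.symm
      · subst hk
        simp only [sb_runs_loop]
        rw [if_neg (by simp [hs]), if_neg hc, hs]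
        have h2 : ∀ g ∈ runs ++ [((some false : Option Bool).getD false, cur)], g.1 = false := by
          intro g hg
          rcases List.mem_append.mp hg with h1 | h1
          · exact hr g h1
          · simp at h1; simp [h1]
        rw [sbP2 rest _ [a] h2 (by simp)]
        exact rhs_eq.symm
    · -- stay in phase 1
      have hs' : sb_key a = false := by simpa using hs
      have hq : sa_q a = true := by simp [sa_q, sb_key] at hs' ⊢; simp [hs']
      have hd : (a :: rest).dropWhile sa_q = rest.dropWhile sa_q :=
        List.dropWhile_cons_of_pos hq
      rcases hst with ⟨hk, hc⟩ | ⟨hk, hc⟩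
      · subst hk; subst hc
        simp only [sb_runs_loop]
        rw [if_pos trivial, hs']
        rw [if_neg (by decide)]
        rw [ih runs (some false) [a] hr (Or.inr ⟨rfl, by simp⟩), hd]
      · subst hk
        simp only [sb_runs_loop]
        rw [if_pos (by simp [hs'])]
        rw [ih runs (some false) (cur ++ [a]) hr (Or.inr ⟨rfl, by simp [hc]⟩), hd]

-- ===== VERDICT (by name: the statement is the Claim_ definition above) =====
theorem split_action_spec : Claim_equal_split_action := by
  intro generate _
  unfold Spec_split_action split_action split_action_alt
  rw [sbP1 _ [] none [] (by simp) (Or.inl ⟨rfl, rfl⟩), splitA_loop_false]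
  simp
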